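-- pv_equiv track=rewrite | github.com/madaschlesinger/tutorials | python/elements/string_utils.py | convert_base_limited
-- ===== SOURCE A (Python) =====
-- def convert_base_limited( x:int, b:int, base:int):
--     '''
--         works only partially as written - i.e. all can be bases must be int - cant be base 13 as an example
--         that would require strings/letter etc.
--
--         First convert to base 10 - then from base 10 -> new base
--     '''
--
--     import math
--
--     n=x
--     result_b10=0
--     for i in range(len(str(x))):
--         lsd = n%10
--         result_b10 = result_b10 + b**i * lsd
--         n //=10
--
--
--
--     power = 0
--     while True:
--         if (base-1)*base**power >= result_b10:
--             break
--         power += 1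
--
--     rebased = 0 ;
--     r = result_b10
--     # now convert b10 -> new base
--     while power >= 0:
--
--         d = r // base ** power
--         r -= d*base**power
--         rebased = rebased * 10 + d
--         power -= 1
--
--     return rebased
-- ===== SOURCE B (Python) =====
-- def convert_base_limited(x, b, base):
--     # Reinterpret the decimal digits of x as base-b digits (Horner), then
--     # write the value out in base `base` by standard repeated division.
--     digs = []
--     n = x
--     for _ in range(len(str(x))):
--         digs.append(n % 10)
--         n //= 10
--     result_b10 = 0
--     for d in reversed(digs):
--         result_b10 = result_b10 * b + d
--     r = result_b10
--     if r < 0: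
--         # a negative value has no digit expansion in a positive base; return it unchanged
--         return r
--     rems = []
--     while r > 0:
--         rems.append(r % base)
--         r //= base
--     rebased = 0
--     for d in reversed(rems):
--         rebased = rebased * 10 + d
--     return rebased
-- ===== Notes on version B (the rewrite author's own statement) =====
-- stated objective: idiomatic
-- what changed: Phase 1 now collects the decimal digits and combines them by Horner's rule instead of accumulating b**i powers, and the whole top-power search plus greedy MSD-first subtraction of phase 2 is replaced by the standard repeated-division remainder loop.
-- outside the precondition, e.g. on convert_base_limited(7, 10, -3): A returns -32, B returns -2
import Mathlib
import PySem

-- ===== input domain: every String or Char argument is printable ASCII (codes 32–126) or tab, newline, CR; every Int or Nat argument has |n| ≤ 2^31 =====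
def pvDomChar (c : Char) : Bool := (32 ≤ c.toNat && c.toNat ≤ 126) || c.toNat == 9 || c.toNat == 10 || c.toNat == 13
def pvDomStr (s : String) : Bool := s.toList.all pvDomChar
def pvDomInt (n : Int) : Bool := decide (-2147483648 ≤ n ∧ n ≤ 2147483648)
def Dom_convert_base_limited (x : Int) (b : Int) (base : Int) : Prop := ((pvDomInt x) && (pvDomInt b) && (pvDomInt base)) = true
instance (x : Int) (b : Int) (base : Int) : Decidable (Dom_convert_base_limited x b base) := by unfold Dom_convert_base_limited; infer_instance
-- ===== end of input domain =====

-- B replaces A's power-search greedy base conversion by Horner digit folding and repeated division (idiomatic, same cost).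


-- ===== PORT A =====
-- for i in range(len(str(x))): lsd = n%10; result_b10 += b**i * lsd; n //= 10
def pvA_phase1 (b : Int) : Nat → Int → Nat → Int → Int
  | 0, _, _, acc => acc
  | c+1, n, i, acc =>
      pvA_phase1 b c (PySem.Int.floordiv n 10) (i+1) (acc + b ^ i * PySem.Int.mod n 10)

-- while True: if (base-1)*base**power >= result_b10: break; power += 1
-- (fuel makes the loop total in Lean; inside Pre_ the fuel supplied below always suffices)
def pvA_findPow (base r : Int) : Nat → Nat → Nat
  | 0, p => p
  | fuel+1, p => if r ≤ (base - 1) * base ^ p then p else pvA_findPow base r fuel (p+1)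

-- while power >= 0: d = r // base**power; r -= d*base**power; rebased = rebased*10 + d; power -= 1
def pvA_rebase (base : Int) : Nat → Int → Int → Int
  | 0, _, rebased => rebased
  | c+1, r, rebased =>
      let d := PySem.Int.floordiv r (base ^ c)
      pvA_rebase base c (r - d * base ^ c) (rebased * 10 + d)

def convert_base_limited (x : Int) (b : Int) (base : Int) : Int :=
  let result_b10 := pvA_phase1 b (PySem.Int.toStr x).toList.length x 0 0
  let power := pvA_findPow base result_b10 (result_b10.natAbs + 1) 0
  pvA_rebase base (power + 1) result_b10 0

-- ===== PORT B =====
-- digs.append(n % 10); n //= 10   (decimal digits, LSD first)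
def pvB_digits10 : Nat → Int → List Int
  | 0, _ => []
  | c+1, n => PySem.Int.mod n 10 :: pvB_digits10 c (PySem.Int.floordiv n 10)

-- for d in reversed(digs): result_b10 = result_b10*b + d
def pvB_horner (b : Int) (ds : List Int) : Int :=
  ds.reverse.foldl (fun acc d => acc * b + d) 0

-- while r > 0: rems.append(r % base); r //= base   (fuel = r+1 suffices inside Pre_)
def pvB_rems (base : Int) : Nat → Int → List Int
  | 0, _ => []
  | fuel+1, r =>
      if 0 < r then PySem.Int.mod r base :: pvB_rems base fuel (PySem.Int.floordiv r base) else []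

def convert_base_limited_alt (x : Int) (b : Int) (base : Int) : Int :=
  let r := pvB_horner b (pvB_digits10 (PySem.Int.toStr x).toList.length x)
  if r < 0 then r
  else ((pvB_rems base (r.toNat + 1) r).reverse).foldl (fun a d => a * 10 + d) 0

-- ===== PRECONDITION & SPEC =====
-- Pre_ excludes base ≤ 1, where A hangs in its power search (base 0 or 1 with a positive
-- intermediate value) or raises ZeroDivisionError (base 0 with value 0), and where a negative
-- base makes the greedy loop emit accidental out-of-range "digits" no base-conversion spec covers.
def Pre_convert_base_limited (x : Int) (b : Int) (base : Int) : Prop := 2 ≤ base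
instance (x : Int) (b : Int) (base : Int) : Decidable (Pre_convert_base_limited x b base) := by
  unfold Pre_convert_base_limited; infer_instance

def pvWitness_convert_base_limited : Int × Int × Int := (123, 5, 7)

def Spec_convert_base_limited (x : Int) (b : Int) (base : Int) (out : Int) : Prop := out = convert_base_limited_alt x b base
instance (x : Int) (b : Int) (base : Int) (out : Int) : Decidable (Spec_convert_base_limited x b base out) := by unfold Spec_convert_base_limited; infer_instance

-- ===== CLAIM (what is proved, stated in full; the proofs are below) =====
def Claim_equal_convert_base_limited : Prop := ∀ (x : Int) (b : Int) (base : Int), Dom_convert_base_limited x b base → Pre_convert_base_limited x b base → Spec_convert_base_limited x b base (convert_base_limited x b base)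

-- ===== LEMMAS AND PROOFS =====

-- decimal value reading: A's power accumulation equals B's Horner fold over the same digit stream
theorem pvHorner_cons (b d : Int) (ds : List Int) :
    pvB_horner b (d :: ds) = pvB_horner b ds * b + d := by
  simp [pvB_horner, List.foldl_append]

theorem pvPhase1_eq_horner (b : Int) :
    ∀ (c : Nat) (n : Int) (i : Nat) (acc : Int),
      pvA_phase1 b c n i acc = acc + b ^ i * pvB_horner b (pvB_digits10 c n) := by
  intro c
  induction c with
  | zero => intro n i acc; simp [pvA_phase1, pvB_digits10, pvB_horner]
  | succ c ih =>
      intro n i acc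
      rw [pvA_phase1, pvB_digits10, pvHorner_cons, ih]
      ring

-- decimal rendering of the base-`base` digit string of r (proof-side value)
def pvRep (base r : Int) : Int := ((Nat.ofDigits 10 (Nat.digits base.toNat r.toNat) : Nat) : Int)

theorem pvRep_zero (base : Int) : pvRep base 0 = 0 := by simp [pvRep]

theorem pvRep_pos (base r : Int) (hb : 2 ≤ base) (hr : 0 < r) :
    pvRep base r = (r % base) + 10 * pvRep base (r / base) := by
  obtain ⟨B, rfl⟩ : ∃ B : Nat, base = (B : Int) := ⟨base.toNat, (Int.toNat_of_nonneg (by omega)).symm⟩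
  obtain ⟨R, rfl⟩ : ∃ R : Nat, r = (R : Int) := ⟨r.toNat, (Int.toNat_of_nonneg (by omega)).symm⟩
  have hB : 1 < B := by exact_mod_cast (by omega : (1:Int) < (B : Int))
  have hR : 0 < R := by exact_mod_cast hr
  unfold pvRep
  rw [Int.ofNat_ediv_ofNat]
  simp only [Int.toNat_natCast]
  rw [Nat.digits_def' hB hR, Nat.ofDigits_cons]
  push_cast
  ring

-- digit-split: peeling the top digit of r below base^(p+1)
theorem pvRep_split (base : Int) (hb : 2 ≤ base) :
    ∀ (p : Nat) (r : Int), 0 ≤ r → r < base ^ (p + 1) →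
      pvRep base r = (r / base ^ p) * 10 ^ p + pvRep base (r % base ^ p) := by
  intro p
  induction p with
  | zero =>
      intro r h0 h1
      simp only [pow_zero, zero_add, pow_one] at h1 ⊢
      rw [Int.ediv_one, Int.emod_one, pvRep_zero, mul_one, add_zero]
      rcases eq_or_lt_of_le h0 with h | h
      · rw [← h, pvRep_zero]
      · rw [pvRep_pos base r hb h, Int.emod_eq_of_lt h0 h1, Int.ediv_eq_zero_of_lt h0 h1,
            pvRep_zero]
        ring
  | succ p ih =>
      intro r h0 h1
      rcases eq_or_lt_of_le h0 with h | h
      · rw [← h]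
        simp [pvRep_zero]
      · have hbpos : (0:Int) < base := by omega
        have hbp1 : (0:Int) < base ^ (p + 1) := pow_pos hbpos _
        have hdiv0 : 0 ≤ r / base := Int.ediv_nonneg h0 (by omega)
        have hdivlt : r / base < base ^ (p + 1) := by
          rw [Int.ediv_lt_iff_lt_mul hbpos]
          calc r < base ^ (p + 1 + 1) := h1
            _ = base ^ (p + 1) * base := by ring
        have e1 : r / base / base ^ p = r / base ^ (p + 1) := by
          rw [Int.ediv_ediv_of_nonneg (by omega : (0:Int) ≤ base), ← pow_succ']
        have e2 : r / base % base ^ p = r % base ^ (p + 1) / base := by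
          have h4 : r % base ^ (p + 1) = r + base * (-(base ^ p * (r / base ^ (p + 1)))) := by
            rw [Int.emod_def]; ring
          rw [h4, Int.add_mul_ediv_left _ _ (by omega : base ≠ 0), Int.emod_def, e1]
          ring
        have e3 : r % base = r % base ^ (p + 1) % base :=
          (Int.emod_emod_of_dvd _ ⟨base ^ p, by ring⟩).symm
        rw [pvRep_pos base r hb h, ih (r / base) hdiv0 hdivlt, e1, e2, e3]
        rcases eq_or_lt_of_le (Int.emod_nonneg r (ne_of_gt hbp1)) with hm | hm
        · rw [← hm]
          simp only [Int.zero_ediv, Int.zero_emod, pvRep_zero]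
          ring
        · rw [pvRep_pos base _ hb hm]
          ring

-- A's MSD-first greedy loop computes the decimal rendering
theorem pvRebase_eq_rep (base : Int) (hb : 2 ≤ base) :
    ∀ (c : Nat) (r acc : Int), 0 ≤ r → r < base ^ c →
      pvA_rebase base c r acc = acc * 10 ^ c + pvRep base r := by
  intro c
  induction c with
  | zero =>
      intro r acc h0 h1
      have : r = 0 := by
        simp only [pow_zero] at h1; omega
      simp [pvA_rebase, this, pvRep_zero]
  | succ c ih =>
      intro r acc h0 h1
      have hbp : (0:Int) < base ^ c := pow_pos (by omega) _
      rw [pvA_rebase]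
      have hfd : PySem.Int.floordiv r (base ^ c) = r / base ^ c :=
        PySem.Int.floordiv_eq_ediv_of_pos hbp
      have hsub : r - r / base ^ c * base ^ c = r % base ^ c := by
        rw [Int.emod_def]; ring
      simp only [hfd, hsub]
      rw [ih (r % base ^ c) _ (Int.emod_nonneg r (by omega)) (by
            exact Int.emod_lt_of_pos r hbp)]
      rw [pvRep_split base hb c r h0 h1]
      ring

-- the fuel-bounded power search really finds a power satisfying the break condition
theorem pvFindPow_cond (base r : Int) :
    ∀ (fuel p : Nat), (∃ q, q < fuel ∧ r ≤ (base - 1) * base ^ (p + q)) →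
      r ≤ (base - 1) * base ^ (pvA_findPow base r fuel p) := by
  intro fuel
  induction fuel with
  | zero => intro p ⟨q, hq, _⟩; omega
  | succ fuel ih =>
      intro p ⟨q, hq, hcond⟩
      rw [pvA_findPow]
      split_ifs with h
      · exact h
      · apply ih
        rcases q with _ | q
        · simp only [Nat.add_zero] at hcond; exact absurd hcond h
        · exact ⟨q, by omega, by rw [show p + 1 + q = p + (q + 1) by ring]; exact hcond⟩

theorem pvCond_exists (base r : Int) (hb : 2 ≤ base) :
    r ≤ (base - 1) * base ^ r.natAbs := by
  have h2 : (2:Int) ^ r.natAbs ≤ base ^ r.natAbs := by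
    apply pow_le_pow_left₀ (by norm_num) (by omega)
  have h3 : (r.natAbs : Int) < 2 ^ r.natAbs := by
    exact_mod_cast Nat.lt_two_pow_self
  have h4 : base ^ r.natAbs ≤ (base - 1) * base ^ r.natAbs := by
    nlinarith [pow_pos (by omega : (0:Int) < base) r.natAbs]
  have h5 : r ≤ (r.natAbs : Int) := Int.le_natAbs
  linarith

-- B's remainder loop produces exactly the base-`base` digit string (Mathlib's Nat.digits)
theorem pvRems_eq_digits (base : Int) (hb : 2 ≤ base) :
    ∀ (fuel : Nat) (r : Int), 0 ≤ r → r.toNat < fuel →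
      pvB_rems base fuel r = (Nat.digits base.toNat r.toNat).map Int.ofNat := by
  intro fuel
  induction fuel with
  | zero => intro r _ h; omega
  | succ fuel ih =>
      intro r h0 hf
      rw [pvB_rems]
      split_ifs with h
      · rw [Nat.digits_def' (by omega : 1 < base.toNat) (by omega : 0 < r.toNat), List.map_cons]
        congr 1
        · rw [PySem.Int.mod_eq_emod_of_pos (by omega : (0:Int) < base)]
          simp only [Int.ofNat_eq_natCast]
          push_cast
          rw [Int.toNat_of_nonneg h0, Int.toNat_of_nonneg (by omega : (0:Int) ≤ base)]
        · have hfd : PySem.Int.floordiv r base = r / base :=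
            PySem.Int.floordiv_eq_ediv_of_pos (by omega)
          have hcast : ((r.toNat / base.toNat : Nat) : Int) = r / base := by
            rw [← Int.ofNat_ediv_ofNat, Int.toNat_of_nonneg h0,
                Int.toNat_of_nonneg (by omega : (0:Int) ≤ base)]
          have h3 : (r / base).toNat = r.toNat / base.toNat := by
            rw [← hcast, Int.toNat_natCast]
          rw [hfd, ih (r / base) (Int.ediv_nonneg h0 (by omega)) (by
                have : r.toNat / base.toNat < r.toNat := Nat.div_lt_self (by omega) (by omega)
                omega), h3]
      · have : r = 0 := by omega
        simp [this]

-- folding the reversed digit list with ×10 is Nat.ofDigits 10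
theorem pvFold_ofDigits :
    ∀ (L : List Nat),
      ((L.map Int.ofNat).reverse).foldl (fun a d => a * 10 + d) 0
        = ((Nat.ofDigits 10 L : Nat) : Int) := by
  intro L
  induction L with
  | nil => simp
  | cons d L ih =>
      rw [List.map_cons, List.reverse_cons, List.foldl_append, ih, Nat.ofDigits_cons]
      simp only [Int.ofNat_eq_natCast, List.foldl_cons, List.foldl_nil]
      push_cast
      ring

-- ===== VERDICT (by name: the statement is the Claim_ definition above) =====
theorem convert_base_limited_spec : Claim_equal_convert_base_limited := by
  intro x b base _ hb
  simp only [Spec_convert_base_limited, convert_base_limited, convert_base_limited_alt]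
  have hb' : (2:Int) ≤ base := hb
  -- the two phase-1 computations agree
  have hph1 : pvA_phase1 b (PySem.Int.toStr x).toList.length x 0 0
      = pvB_horner b (pvB_digits10 (PySem.Int.toStr x).toList.length x) := by
    rw [pvPhase1_eq_horner]; ring
  set r := pvB_horner b (pvB_digits10 (PySem.Int.toStr x).toList.length x) with hr
  rw [hph1]
  by_cases hneg : r < 0
  · -- negative value: the search breaks at power 0 and the single greedy step returns r
    simp only [if_pos hneg]
    have hfp : pvA_findPow base r (r.natAbs + 1) 0 = 0 := by
      rw [pvA_findPow, if_pos (by rw [pow_zero, mul_one]; omega : r ≤ (base - 1) * base ^ 0)]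
    rw [hfp]
    show pvA_rebase base (0 + 1) r 0 = r
    simp [pvA_rebase, pow_zero, PySem.Int.floordiv]
  · -- nonnegative value: greedy MSD rendering = repeated-division rendering
    replace hneg : 0 ≤ r := by omega
    simp only [if_neg (by omega : ¬ r < 0)]
    set P := pvA_findPow base r (r.natAbs + 1) 0 with hP
    have hcond : r ≤ (base - 1) * base ^ P :=
      pvFindPow_cond base r (r.natAbs + 1) 0 ⟨r.natAbs, by omega, by
        simpa using pvCond_exists base r hb'⟩
    have hlt : r < base ^ (P + 1) := by
      have hp : (0:Int) < base ^ P := pow_pos (by omega) _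
      calc r ≤ (base - 1) * base ^ P := hcond
        _ < base * base ^ P := by nlinarith
        _ = base ^ (P + 1) := by ring
    rw [pvRebase_eq_rep base hb' (P + 1) r 0 hneg hlt,
        pvRems_eq_digits base hb' (r.toNat + 1) r hneg (by omega),
        pvFold_ofDigits]
    simp [pvRep]
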